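-- pv_equiv track=rewrite | github.com/mrtrz257/Estructuras-de-Datos-y-Algoritmos-2022 | Hashing/Ejercicio 2/hash.py | cantPrimo
-- ===== SOURCE A (Python) =====
-- def cantPrimo(cant): #devuelve una cantidad primo
--     lista = [2, 3, 5, 7, 11, 13, 17, 19, 23, 29, 31, 37]
--     primo = -1
--     i = 0
--     band = False
--     if(cant < lista[len(lista)-1]):
--         while not band and i < len(lista):
--             if(lista[i] > cant):
--                 primo = lista[i]
--                 band = True
--             i += 1
--     else:
--         while not band and i <= 39:
--             resultado = (i**2) + i + 41
--             if(resultado > cant):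
--                 primo = resultado
--                 band = True
--             i += 1
--     return primo
-- ===== SOURCE B (Python) =====
-- def cantPrimo(cant):
--     primes = [2, 3, 5, 7, 11, 13, 17, 19, 23, 29, 31, 37]
--     if cant < 37:
--         n = len(primes)
--         f = lambda i: primes[i]
--     else:
--         n = 40
--         f = lambda i: i * i + i + 41
--     # binary search for the first index with f(i) > cant (f is strictly increasing)
--     lo, hi = 0, n
--     while lo < hi:
--         mid = (lo + hi) // 2
--         if f(mid) > cant:
--             hi = mid
--         else:
--             lo = mid + 1
--     return f(lo) if lo < n else -1
-- ===== Notes on version B (the rewrite author's own statement) =====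
-- stated objective: alternative
-- what changed: Replaces A's flag-controlled linear first-greater scans with a binary search (bisection on lo/hi halving the interval) over the chosen monotone candidate sequence, returning f(lo) if the found index is in range and -1 otherwise.
import Mathlib
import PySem

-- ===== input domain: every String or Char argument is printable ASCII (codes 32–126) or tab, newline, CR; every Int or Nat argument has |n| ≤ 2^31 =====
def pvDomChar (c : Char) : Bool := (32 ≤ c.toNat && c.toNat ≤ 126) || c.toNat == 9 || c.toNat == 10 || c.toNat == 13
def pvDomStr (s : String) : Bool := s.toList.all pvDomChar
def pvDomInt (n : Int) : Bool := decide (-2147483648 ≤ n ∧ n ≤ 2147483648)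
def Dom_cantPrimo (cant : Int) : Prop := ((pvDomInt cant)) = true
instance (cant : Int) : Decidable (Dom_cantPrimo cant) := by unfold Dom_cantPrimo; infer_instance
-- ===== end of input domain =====

-- B replaces A's linear first-greater scans by a binary search over the monotone
-- candidate sequence (objective: alternative, same bounded cost).

-- ===== PORT A =====
-- while not band and i < len(lista): … (index i kept as a Nat; Python's i only takes values 0..len)
def cantPrimoLoop1 (cant : Int) (lista : List Int) (primo : Int) (band : Bool) (i : Nat) : Int :=
  if band = false ∧ i < lista.length then
    let x := (PySem.List.pyGet? lista (i : Int)).getD 0   -- lista[i]; always in range when the guard holds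
    if x > cant then cantPrimoLoop1 cant lista x true (i+1)
    else cantPrimoLoop1 cant lista primo band (i+1)
  else primo
termination_by lista.length - i
decreasing_by all_goals omega

-- while not band and i <= 39: …
def cantPrimoLoop2 (cant : Int) (primo : Int) (band : Bool) (i : Nat) : Int :=
  if band = false ∧ i ≤ 39 then
    let r : Int := (i : Int) ^ 2 + (i : Int) + 41
    if r > cant then cantPrimoLoop2 cant r true (i+1)
    else cantPrimoLoop2 cant primo band (i+1)
  else primo
termination_by 40 - i
decreasing_by all_goals omega

def cantPrimo (cant : Int) : Int :=
  let lista : List Int := [2, 3, 5, 7, 11, 13, 17, 19, 23, 29, 31, 37]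
  if cant < (PySem.List.pyGet? lista ((lista.length : Int) - 1)).getD 0 then
    cantPrimoLoop1 cant lista (-1) false 0
  else
    cantPrimoLoop2 cant (-1) false 0

-- ===== PORT B =====
-- while lo < hi: mid = (lo+hi)//2; if f(mid) > cant: hi = mid else: lo = mid+1
def cantPrimoBisect (f : Nat → Int) (cant : Int) (lo hi : Nat) : Nat :=
  if lo < hi then
    let mid := (lo + hi) / 2
    if f mid > cant then cantPrimoBisect f cant lo mid
    else cantPrimoBisect f cant (mid + 1) hi
  else lo
termination_by hi - lo
decreasing_by all_goals omega

def cantPrimo_alt (cant : Int) : Int :=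
  let primes : List Int := [2, 3, 5, 7, 11, 13, 17, 19, 23, 29, 31, 37]
  if cant < 37 then
    -- f(i) = primes[i]; i is always in range when evaluated, so getD's default is never used
    let f := fun i : Nat => primes.getD i 0
    let lo := cantPrimoBisect f cant 0 primes.length
    if lo < primes.length then f lo else -1
  else
    let f := fun i : Nat => (i : Int) * i + i + 41
    let lo := cantPrimoBisect f cant 0 40
    if lo < 40 then f lo else -1

-- ===== PRECONDITION & SPEC =====
def Spec_cantPrimo (cant : Int) (out : Int) : Prop := out = cantPrimo_alt cant
instance (cant : Int) (out : Int) : Decidable (Spec_cantPrimo cant out) := by unfold Spec_cantPrimo; infer_instance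

-- ===== CLAIM (what is proved, stated in full; the proofs are below) =====
def Claim_equal_cantPrimo : Prop := ∀ (cant : Int), Dom_cantPrimo cant → Spec_cantPrimo cant (cantPrimo cant)

-- ===== LEMMAS AND PROOFS =====

-- reference function used only in proofs: first index j ∈ [i, n) with p j, else n
def firstIdx (p : Nat → Bool) (i n : Nat) : Nat :=
  if i < n then (if p i then i else firstIdx p (i + 1) n) else n
termination_by n - i
decreasing_by all_goals omega

theorem firstIdx_eq (p : Nat → Bool) (n k : Nat) :
    ∀ m i, k ≤ i + m → i ≤ k → k ≤ n →
      (∀ j, i ≤ j → j < k → p j = false) → (k < n → p k = true) →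
      firstIdx p i n = k := by
  intro m
  induction m with
  | zero =>
    intro i hm hik hkn hF hT
    have hik' : i = k := by omega
    subst hik'
    by_cases hin : i < n
    · rw [firstIdx]; simp [hin, hT hin]
    · have : i = n := by omega
      rw [firstIdx]; simp [hin, this]
  | succ m ih =>
    intro i hm hik hkn hF hT
    by_cases hik' : i = k
    · subst hik'
      by_cases hin : i < n
      · rw [firstIdx]; simp [hin, hT hin]
      · have : i = n := by omega
        rw [firstIdx]; simp [hin, this]
    · have hiltk : i < k := by omega
      have hin : i < n := by omega
      rw [firstIdx]
      simp only [hin, if_true, hF i (le_refl i) hiltk, if_false]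
      exact ih (i + 1) (by omega) (by omega) hkn (fun j hj hjk => hF j (by omega) hjk) hT

theorem loop1_band_true (cant : Int) (lista : List Int) (primo : Int) (i : Nat) :
    cantPrimoLoop1 cant lista primo true i = primo := by
  rw [cantPrimoLoop1]; simp

theorem loop2_band_true (cant : Int) (primo : Int) (i : Nat) :
    cantPrimoLoop2 cant primo true i = primo := by
  rw [cantPrimoLoop2]; simp

def pvPrimes : List Int := [2, 3, 5, 7, 11, 13, 17, 19, 23, 29, 31, 37]

theorem loop1_eq_firstIdx (cant : Int) :
    ∀ m i, 12 ≤ i + m →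
      cantPrimoLoop1 cant pvPrimes (-1) false i
        = (let k := firstIdx (fun j => decide (pvPrimes.getD j 0 > cant)) i 12;
           if k < 12 then pvPrimes.getD k 0 else -1) := by
  intro m
  induction m with
  | zero =>
    intro i h
    have hi : ¬ i < 12 := by omega
    rw [cantPrimoLoop1, firstIdx]
    simp [pvPrimes, hi, show ¬ i < pvPrimes.length by simp [pvPrimes]; omega]
  | succ m ih =>
    intro i h
    by_cases hi : i < 12
    · rw [cantPrimoLoop1]
      have hlen : i < pvPrimes.length := by simp [pvPrimes]; omega
      have hx : (PySem.List.pyGet? pvPrimes (i : Int)).getD 0 = pvPrimes.getD i 0 := by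
        simp [PySem.List.pyGet?_natCast, List.getD, List.getElem?_eq_getElem hlen]
      simp only [hlen, and_true, hx]
      rw [firstIdx]
      by_cases hgt : pvPrimes.getD i 0 > cant
      · rw [if_pos hgt, loop1_band_true]
        have hd : decide (pvPrimes.getD i 0 > cant) = true := by simpa using hgt
        simp only [hd]
        simp [hi]
      · simp only [show i < 12 from hi, if_true, decide_eq_true_eq, hgt, decide_false,
          if_false, Bool.false_eq_true]
        simpa using ih (i + 1) (by omega)
    · rw [cantPrimoLoop1, firstIdx]
      simp [pvPrimes, hi]

theorem loop2_eq_firstIdx (cant : Int) :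
    ∀ m i, 40 ≤ i + m →
      cantPrimoLoop2 cant (-1) false i
        = (let k := firstIdx (fun j => decide ((j : Int) * j + j + 41 > cant)) i 40;
           if k < 40 then (k : Int) * k + k + 41 else -1) := by
  intro m
  induction m with
  | zero =>
    intro i h
    have hi : ¬ i ≤ 39 := by omega
    rw [cantPrimoLoop2, firstIdx]
    simp [hi, show ¬ i < 40 by omega]
  | succ m ih =>
    intro i h
    by_cases hi : i ≤ 39
    · rw [cantPrimoLoop2]
      have hsq : ((i : Int) ^ 2 + (i : Int) + 41) = ((i : Int) * i + i + 41) := by ring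
      simp only [hi, and_true, hsq]
      rw [firstIdx]
      by_cases hgt : (i : Int) * i + i + 41 > cant
      · simp [show i < 40 by omega, hgt, loop2_band_true]
      · simp only [show i < 40 by omega, if_true, decide_eq_true_eq, hgt, decide_false,
          if_false, Bool.false_eq_true]
        simpa using ih (i + 1) (by omega)
    · rw [cantPrimoLoop2, firstIdx]
      simp [hi, show ¬ i < 40 by omega]

theorem bisect_eq_firstIdx (f : Nat → Int) (cant : Int) (n : Nat)
    (hmono : ∀ i j, i ≤ j → j < n → f i ≤ f j) :
    ∀ m lo hi, hi ≤ lo + m → lo ≤ hi → hi ≤ n →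
      (∀ j, j < lo → ¬ f j > cant) → (∀ j, hi ≤ j → j < n → f j > cant) →
      cantPrimoBisect f cant lo hi = firstIdx (fun j => decide (f j > cant)) 0 n := by
  intro m
  induction m with
  | zero =>
    intro lo hi hm hlohi hhin hF hT
    have he : lo = hi := by omega
    subst he
    rw [cantPrimoBisect]
    simp only [lt_irrefl, if_false]
    refine (firstIdx_eq _ n lo lo 0 (by omega) (by omega) (by omega) ?_ ?_).symm
    · intro j _ hj; simpa using hF j hj
    · intro hln; simpa using hT lo (le_refl lo) hln
  | succ m ih =>
    intro lo hi hm hlohi hhin hF hT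
    by_cases hlt : lo < hi
    · rw [cantPrimoBisect]
      simp only [hlt, if_true]
      set mid := (lo + hi) / 2 with hmid
      have h1 : lo ≤ mid := by omega
      have h2 : mid < hi := by omega
      by_cases hgt : f mid > cant
      · simp only [hgt, if_true]
        exact ih lo mid (by omega) (by omega) (by omega) hF
          (fun j hj hjn => lt_of_lt_of_le hgt (hmono mid j hj hjn))
      · simp only [hgt, if_false]
        refine ih (mid + 1) hi (by omega) (by omega) hhin ?_ hT
        intro j hj
        by_cases hjlo : j < lo
        · exact hF j hjlo
        · intro hc
          exact hgt (lt_of_lt_of_le hc (hmono j mid (by omega) (by omega)))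
    · have he : lo = hi := by omega
      subst he
      rw [cantPrimoBisect]
      simp only [lt_irrefl, if_false]
      refine (firstIdx_eq _ n lo lo 0 (by omega) (by omega) (by omega) ?_ ?_).symm
      · intro j _ hj; simpa using hF j hj
      · intro hln; simpa using hT lo (le_refl lo) hln

theorem primes_mono : ∀ i j : Nat, i ≤ j → j < 12 → pvPrimes.getD i 0 ≤ pvPrimes.getD j 0 := by
  intro i j hij hj
  interval_cases j <;> interval_cases i <;> decide

theorem quad_mono (i j : Nat) (hij : i ≤ j) :
    (i : Int) * i + i + 41 ≤ (j : Int) * j + j + 41 := by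
  have h1 : (i : Int) ≤ j := by exact_mod_cast hij
  have h0 : (0 : Int) ≤ i := by positivity
  nlinarith

-- ===== VERDICT (by name: the statement is the Claim_ definition above) =====
theorem cantPrimo_spec : Claim_equal_cantPrimo := by
  intro cant _
  unfold Spec_cantPrimo cantPrimo cantPrimo_alt
  have h37 : ((PySem.List.pyGet? ([2, 3, 5, 7, 11, 13, 17, 19, 23, 29, 31, 37] : List Int)
      ((([2, 3, 5, 7, 11, 13, 17, 19, 23, 29, 31, 37] : List Int).length : Int) - 1)).getD 0) = 37 := by
    decide
  by_cases h : cant < 37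
  · simp only [h37, if_pos h]
    rw [show ([2, 3, 5, 7, 11, 13, 17, 19, 23, 29, 31, 37] : List Int) = pvPrimes from rfl]
    rw [show pvPrimes.length = 12 from rfl]
    rw [loop1_eq_firstIdx cant 12 0 (by omega),
      bisect_eq_firstIdx (fun i => pvPrimes.getD i 0) cant 12
        (fun i j hij hj => primes_mono i j hij hj) 12 0 12 (by omega) (by omega) (by omega)
        (by intro j hj; omega) (by intro j hj hj'; omega)]
  · simp only [h37, if_neg h]
    rw [loop2_eq_firstIdx cant 40 0 (by omega),
      bisect_eq_firstIdx (fun i => (i : Int) * i + i + 41) cant 40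
        (fun i j hij _ => quad_mono i j hij) 40 0 40 (by omega) (by omega) (by omega)
        (by intro j hj; omega) (by intro j hj hj'; omega)]
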